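-- pv_equiv track=rewrite | github.com/Hyojeong721/TIL | SWA/0819/ready2start/4869_종이붙이기/s2.py | count_set
-- ===== SOURCE A (Python) =====
-- def count_set(width):
--     """
--     (20 X l) 크기의 교실 바닥이 주어졌을 때
--     (10 X 20) 타일과 (20 X 20) 타일로
--     교실 바닥을 모두 채우는 경우의 수를 구한다.
--
--     Args:
--         width: 교실 바닥의 가로 길이
--     Returns:
--         타일로 교실 바닥을 채우는 경우의 수
--     """
--     # 가로 길이가 10인 경우
--     if width == 10:
--         # (10 X 20) 1개
--         return 1
--
--     # 가로 길이가 20인 경우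
--     if width == 20:
--         # (10 X 20) 2개 / (20 X 10) 2개 / (20 X 20) 1개
--         return 3
--
--     # counts[n] : 가로 길이가 10n일 때 바닥을 채우는 경우의 수
--     counts = [0, 1, 3]
--
--     """
--     가로 길이가 30 이상인 경우
--         a. 맨 왼쪽이 (10 X 20) 1개인 경우 = count_set(width - 10)
--         b. 맨 왼쪽이 (20 X 10) 2개인 경우 = count_set(width - 20)
--         c. 맨 왼쪽이 (20 X 20) 1개인 경우 = count_set(width - 20)
--     """
--     for i in range(3, width // 10 + 1):
--         cnt = counts[i - 1] + 2 * counts[i - 2]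
--         counts.append(cnt)
--
--     return counts[-1]
-- ===== SOURCE B (Python) =====
-- def count_set(width):
--     n = width // 10
--     if width == 10:
--         return 1
--     if n < 3:
--         return 3
--     # f(n) = f(n-1) + 2*f(n-2), f(1)=1, f(2)=3 has closed form (2^(n+1) + (-1)^n) / 3
--     return (2 ** (n + 1) + (-1) ** n) // 3
-- ===== Notes on version B (the rewrite author's own statement) =====
-- stated objective: faster
-- what changed: Replaces the O(n) DP loop that builds the whole counts table with the closed form (2^(n+1)+(-1)^n)//3 of the linear recurrence.
import Mathlib
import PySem

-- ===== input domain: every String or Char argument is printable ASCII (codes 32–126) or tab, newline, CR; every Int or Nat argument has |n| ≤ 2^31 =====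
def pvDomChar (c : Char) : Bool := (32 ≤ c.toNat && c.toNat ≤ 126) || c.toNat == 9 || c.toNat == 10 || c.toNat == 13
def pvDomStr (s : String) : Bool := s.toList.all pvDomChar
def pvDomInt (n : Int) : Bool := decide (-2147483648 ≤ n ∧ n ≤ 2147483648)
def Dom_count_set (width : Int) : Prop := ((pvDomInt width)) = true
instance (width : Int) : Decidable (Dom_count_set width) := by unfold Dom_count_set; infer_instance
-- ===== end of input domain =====

-- B replaces A's O(n) DP table with the closed form (2^(n+1)+(-1)^n)//3 of the recurrence (faster).

-- ===== PORT A =====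
-- the list indices counts[i-1], counts[i-2], counts[-1] are always in range, so pyGetD _ _ 0 is exact
def count_set (width : Int) : Int :=
  if width = 10 then 1
  else if width = 20 then 3
  else
    let counts := (PySem.List.pyRange 3 (PySem.Int.floordiv width 10 + 1) 1).foldl
      (fun counts i =>
        counts ++ [PySem.List.pyGetD counts (i - 1) 0 + 2 * PySem.List.pyGetD counts (i - 2) 0])
      [0, 1, 3]
    PySem.List.pyGetD counts (-1) 0

-- ===== PORT B =====
-- the exponents n+1 and n are taken at n ≥ 3 only, so .toNat is exact there
def count_set_alt (width : Int) : Int :=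
  let n := PySem.Int.floordiv width 10
  if width = 10 then 1
  else if n < 3 then 3
  else PySem.Int.floordiv (2 ^ (n + 1).toNat + (-1) ^ n.toNat) 3

-- ===== PRECONDITION & SPEC =====
def Spec_count_set (width : Int) (out : Int) : Prop := out = count_set_alt width
instance (width : Int) (out : Int) : Decidable (Spec_count_set width out) := by unfold Spec_count_set; infer_instance

-- ===== CLAIM (what is proved, stated in full; the proofs are below) =====
def Claim_equal_count_set : Prop := ∀ (width : Int), Dom_count_set width → Spec_count_set width (count_set width)

-- ===== LEMMAS AND PROOFS =====

-- the recurrence A's table satisfies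
def pvG : Nat → Int
  | 0 => 0
  | 1 => 1
  | 2 => 3
  | (k + 3) => pvG (k + 2) + 2 * pvG (k + 1)

-- A's loop step
def pvStep (counts : List Int) (i : Int) : List Int :=
  counts ++ [PySem.List.pyGetD counts (i - 1) 0 + 2 * PySem.List.pyGetD counts (i - 2) 0]

-- reading the table: entry k of [0, g 1, …, g m] is g k
lemma pvTab_getD (m k : Nat) (hk : k ≤ m) :
    (0 :: (List.range' 1 m).map pvG).getD k 0 = pvG k := by
  cases k with
  | zero => simp [pvG]
  | succ j =>
    have hj : j < m := by omega
    simp only [List.getD, List.getElem?_cons_succ, List.getElem?_map, List.getElem?_range', hj,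
      Option.map_some, Option.getD_some]
    congr 1; omega

-- the loop invariant: after processing range(3, m+1) the table is [0, g 1, …, g m]
lemma pvLoop (m : Nat) (hm : 2 ≤ m) :
    (PySem.List.pyRange 3 ((m : Int) + 1) 1).foldl pvStep [0, 1, 3]
      = 0 :: (List.range' 1 m).map pvG := by
  induction m with
  | zero => omega
  | succ m ih =>
    rcases Nat.lt_or_ge m 2 with h2 | h2
    · interval_cases m
      · omega
      · rw [show ((2 : Nat) : Int) + 1 = 3 by norm_num, PySem.List.pyRange_one_eq_nil (by norm_num)]
        simp [List.range', pvG]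
    · have hstep : ((m : Int) + 1) + 1 = ((m + 1 : Nat) : Int) + 1 := by push_cast; ring
      rw [← hstep, PySem.List.pyRange_one_succ_right (by exact_mod_cast by omega), List.foldl_append,
        ih h2]
      show pvStep (0 :: (List.range' 1 m).map pvG) ((m : Int) + 1)
          = 0 :: (List.range' 1 (m + 1)).map pvG
      unfold pvStep
      have e1 : ((m : Int) + 1) - 1 = ((m : Nat) : Int) := by ring
      have e2 : ((m : Int) + 1) - 2 = (((m - 1 : Nat) : Nat) : Int) := by
        push_cast [Nat.cast_sub (by omega : 1 ≤ m)]; ring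
      rw [e1, e2, PySem.List.pyGetD_natCast, PySem.List.pyGetD_natCast,
        pvTab_getD m m le_rfl, pvTab_getD m (m - 1) (by omega)]
      have : pvG m + 2 * pvG (m - 1) = pvG (m + 1) := by
        obtain ⟨k, rfl⟩ : ∃ k, m = k + 2 := ⟨m - 2, by omega⟩
        simp [pvG]
      rw [this, List.range'_1_concat]
      simp [Nat.add_comm]

-- closed form: 3 * g n = 2^(n+1) + (-1)^n
lemma pvClosed (n : Nat) : 3 * pvG (n + 1) = 2 ^ (n + 2) + (-1 : Int) ^ (n + 1) := by
  induction n using Nat.twoStepInduction with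
  | zero => decide
  | one => decide
  | more k ihk ihk1 =>
    have h1 : 3 * pvG (k + 2) = 2 ^ (k + 3) + (-1 : Int) ^ (k + 2) := by simpa using ihk1
    show 3 * pvG (k + 3) = 2 ^ (k + 4) + (-1 : Int) ^ (k + 3)
    rw [pvG, mul_add, h1, show 3 * (2 * pvG (k + 1)) = 2 * (3 * pvG (k + 1)) by ring, ihk]
    ring

-- the last entry of the table
lemma pvTab_last (m : Nat) (hm : 1 ≤ m) :
    PySem.List.pyGetD (0 :: (List.range' 1 m).map pvG) (-1) 0 = pvG m := by
  obtain ⟨j, rfl⟩ : ∃ j, m = j + 1 := ⟨m - 1, by omega⟩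
  rw [List.range'_1_concat]
  have hsplit : (0 : Int) :: List.map pvG (List.range' 1 j ++ [1 + j])
      = ((0 : Int) :: List.map pvG (List.range' 1 j)) ++ [pvG (1 + j)] := by simp
  rw [hsplit, PySem.List.pyGetD_neg_one_append_singleton, Nat.add_comm 1 j]

-- ===== VERDICT (by name: the statement is the Claim_ definition above) =====
theorem count_set_spec : Claim_equal_count_set := by
  intro width _
  unfold Spec_count_set
  by_cases h10 : width = 10
  · subst h10; decide
  by_cases h20 : width = 20
  · subst h20; decide
  by_cases h3 : PySem.Int.floordiv width 10 < 3
  · -- small case: the loop body never runs and counts[-1] = 3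
    simp only [count_set, count_set_alt, if_neg h10, if_neg h20, if_pos h3]
    rw [PySem.List.pyRange_one_eq_nil (by omega)]
    simp only [List.foldl_nil]
    decide
  · -- main case: n = width // 10 ≥ 3
    simp only [count_set, count_set_alt, if_neg h10, if_neg h20, if_neg h3]
    obtain ⟨m, hm⟩ : ∃ m : Nat, PySem.Int.floordiv width 10 = (m : Int) :=
      ⟨(PySem.Int.floordiv width 10).toNat, by omega⟩
    have hm3 : 3 ≤ m := by omega
    rw [hm, show (fun (counts : List Int) (i : Int) =>
        counts ++ [PySem.List.pyGetD counts (i - 1) 0 + 2 * PySem.List.pyGetD counts (i - 2) 0])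
        = pvStep from rfl,
      pvLoop m (by omega), pvTab_last m (by omega)]
    obtain ⟨j, rfl⟩ : ∃ j, m = j + 1 := ⟨m - 1, by omega⟩
    have hc := pvClosed j
    have hexp1 : (((j : Int) + 1) + 1).toNat = j + 2 := by omega
    have hexp2 : ((j : Int) + 1).toNat = j + 1 := by omega
    push_cast
    rw [hexp1, hexp2, ← hc,
      PySem.Int.floordiv_eq_ediv_of_pos (by norm_num : (0:Int) < 3)]
    omega
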